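-- pv_equiv track=rewrite | github.com/dylanyunlon/operatorRL | integrations/mahjong/src/mahjong_agent/tile_encoder.py | id_to_tile
-- ===== SOURCE A (Python) =====
-- _SUIT_NAMES = {0: "m", 9: "p", 18: "s", 27: "z"}
--
-- def id_to_tile(tile_id: int) -> str:
--     """Convert 34-type index back to string notation.
--
--     Args:
--         tile_id: Integer 0-33.
--
--     Returns:
--         String like '1m', '5p', '7z'.
--     """
--     if tile_id < 0 or tile_id > 33:
--         raise ValueError(f"tile_id {tile_id} out of range [0, 33]")
--     for offset in sorted(_SUIT_NAMES.keys(), reverse=True):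
--         if tile_id >= offset:
--             suit = _SUIT_NAMES[offset]
--             num = tile_id - offset + 1
--             return f"{num}{suit}"
--     raise ValueError(f"Cannot decode tile_id {tile_id}")
-- ===== SOURCE B (Python) =====
-- def id_to_tile(tile_id: int) -> str:
--     """Convert 34-type index back to string notation (closed-form arithmetic)."""
--     if tile_id < 0 or tile_id > 33:
--         raise ValueError(f"tile_id {tile_id} out of range [0, 33]")
--     return f"{tile_id % 9 + 1}{'mpsz'[tile_id // 9]}"
-- ===== Notes on version B (the rewrite author's own statement) =====
-- stated objective: simpler
-- what changed: Replaces the descending scan over the sorted suit-offset dict with closed-form divmod arithmetic: suit = 'mpsz'[tile_id//9], number = tile_id%9+1.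
import Mathlib
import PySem

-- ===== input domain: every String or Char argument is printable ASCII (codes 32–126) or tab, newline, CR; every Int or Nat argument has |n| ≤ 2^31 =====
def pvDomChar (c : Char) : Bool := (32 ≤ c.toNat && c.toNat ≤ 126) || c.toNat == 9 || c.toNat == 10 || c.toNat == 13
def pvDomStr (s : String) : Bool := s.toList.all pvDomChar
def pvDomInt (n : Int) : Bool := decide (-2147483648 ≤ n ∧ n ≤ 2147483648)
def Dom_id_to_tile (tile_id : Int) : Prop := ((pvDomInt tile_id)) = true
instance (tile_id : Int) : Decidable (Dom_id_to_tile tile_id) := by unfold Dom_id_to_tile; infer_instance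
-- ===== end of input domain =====

-- ===== PORT A =====
-- B replaces the descending offset scan with closed-form divmod arithmetic (simpler).
-- Outside [0,33] Python A raises ValueError; those inputs are excluded by Pre_id_to_tile.
def pvSuitNames : PySem.Dict Int String := PySem.Dict.ofList [((0:Int), "m"), (9, "p"), (18, "s"), (27, "z")]

-- loop 'for offset in sorted(_SUIT_NAMES.keys(), reverse=True)'; [] = the final raise
def pvIdLoop (tile_id : Int) : List Int → String
  | [] => ""
  | o :: rest =>
      if tile_id ≥ o then
        PySem.Int.toStr (tile_id - o + 1) ++ (PySem.Dict.get? pvSuitNames o).getD ""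
      else pvIdLoop tile_id rest

def id_to_tile (tile_id : Int) : String :=
  if tile_id < 0 ∨ tile_id > 33 then ""  -- raise ValueError (excluded by Pre_)
  else pvIdLoop tile_id (PySem.List.sorted (PySem.Dict.keys pvSuitNames) (fun x => x) true)

-- ===== PORT B =====
def id_to_tile_alt (tile_id : Int) : String :=
  if tile_id < 0 ∨ tile_id > 33 then ""  -- raise ValueError (excluded by Pre_)
  else PySem.Int.toStr (PySem.Int.mod tile_id 9 + 1)
       ++ ((PySem.Str.pyGet? "mpsz" (PySem.Int.floordiv tile_id 9)).map (fun c => String.ofList [c])).getD ""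

-- ===== PRECONDITION & SPEC =====
-- Pre_: A raises ValueError outside [0, 33]
def Pre_id_to_tile (tile_id : Int) : Prop := 0 ≤ tile_id ∧ tile_id ≤ 33
instance (tile_id : Int) : Decidable (Pre_id_to_tile tile_id) := by unfold Pre_id_to_tile; infer_instance
def pvWitness_id_to_tile : Int := (7)

def Spec_id_to_tile (tile_id : Int) (out : String) : Prop := out = id_to_tile_alt tile_id
instance (tile_id : Int) (out : String) : Decidable (Spec_id_to_tile tile_id out) := by unfold Spec_id_to_tile; infer_instance

-- ===== CLAIM (what is proved, stated in full; the proofs are below) =====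
def Claim_equal_id_to_tile : Prop := ∀ (tile_id : Int), Dom_id_to_tile tile_id → Pre_id_to_tile tile_id → Spec_id_to_tile tile_id (id_to_tile tile_id)

-- ===== LEMMAS AND PROOFS =====

-- ===== VERDICT (by name: the statement is the Claim_ definition above) =====
set_option maxRecDepth 8000 in
set_option maxHeartbeats 1600000 in
theorem id_to_tile_spec : Claim_equal_id_to_tile := by
  intro t _ hpre
  obtain ⟨h0, h33⟩ := hpre
  unfold Spec_id_to_tile
  interval_cases t <;> decide
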